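-- pv_equiv track=rewrite | github.com/Szarny/AtCoder | Others/みんなのプロコン2018/500.py | possible_to_purchase
-- ===== SOURCE A (Python) =====
-- def possible_to_purchase(possess, Costs):
--     if len(Costs) == 0:
--         return False
--
--     # どの商品も買えないなら財宝を売却する
--     min_costs = 10**16
--     for cost in Costs:
--         min_costs = min(cost, min_costs)
--
--     if min_costs > possess:
--         return False
--
--     return True
-- ===== SOURCE B (Python) =====
-- def possible_to_purchase(possess, Costs):
--     return any(cost <= possess for cost in Costs)
-- ===== Notes on version B (the rewrite author's own statement) =====
-- stated objective: idiomatic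
-- what changed: Replaces the length guard plus sentinel-seeded min-reduction and comparison with a single short-circuiting existence check any(cost <= possess for cost in Costs); the empty case falls out of any() for free, and any() short-circuits on the first affordable cost (constant-factor speedup measured).
import Mathlib
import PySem

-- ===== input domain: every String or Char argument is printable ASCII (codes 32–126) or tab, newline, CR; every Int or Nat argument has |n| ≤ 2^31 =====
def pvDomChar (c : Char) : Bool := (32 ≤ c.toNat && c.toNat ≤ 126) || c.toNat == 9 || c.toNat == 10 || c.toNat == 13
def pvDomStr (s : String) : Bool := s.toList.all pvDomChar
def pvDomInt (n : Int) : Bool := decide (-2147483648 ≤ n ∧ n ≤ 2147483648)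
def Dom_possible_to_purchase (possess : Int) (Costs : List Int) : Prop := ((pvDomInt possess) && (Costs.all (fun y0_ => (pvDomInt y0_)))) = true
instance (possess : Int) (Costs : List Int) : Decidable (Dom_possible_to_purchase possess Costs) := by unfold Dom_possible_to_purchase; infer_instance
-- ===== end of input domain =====

-- B replaces A's sentinel-seeded min-reduction-then-compare with a direct short-circuiting existence check (idiomatic; same cost).

-- ===== PORT A =====
def possible_to_purchase (possess : Int) (Costs : List Int) : Bool :=
  if Costs.length == 0 then false
  else
    -- min_costs = 10**16; for cost in Costs: min_costs = min(cost, min_costs)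
    let min_costs : Int := Costs.foldl (fun m cost => min cost m) (10 ^ 16)
    if min_costs > possess then false
    else true

-- ===== PORT B =====
def possible_to_purchase_alt (possess : Int) (Costs : List Int) : Bool :=
  Costs.any (fun cost => decide (cost ≤ possess))

-- ===== PRECONDITION & SPEC =====
def Spec_possible_to_purchase (possess : Int) (Costs : List Int) (out : Bool) : Prop := out = possible_to_purchase_alt possess Costs
instance (possess : Int) (Costs : List Int) (out : Bool) : Decidable (Spec_possible_to_purchase possess Costs out) := by unfold Spec_possible_to_purchase; infer_instance

-- ===== CLAIM (what is proved, stated in full; the proofs are below) =====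
def Claim_equal_possible_to_purchase : Prop := ∀ (possess : Int) (Costs : List Int), Dom_possible_to_purchase possess Costs → Spec_possible_to_purchase possess Costs (possible_to_purchase possess Costs)

-- ===== LEMMAS AND PROOFS =====

-- The running minimum over the list is ≤ p iff the seed is ≤ p or some element is ≤ p.
theorem foldl_min_le_iff (l : List Int) (s p : Int) :
    (l.foldl (fun m cost => min cost m) s ≤ p) ↔ (s ≤ p ∨ ∃ c ∈ l, c ≤ p) := by
  induction l generalizing s with
  | nil => simp
  | cons x xs ih =>
    simp only [List.foldl_cons, ih, min_le_iff, List.mem_cons]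
    constructor
    · rintro (h | ⟨c, hc, hcp⟩)
      · rcases h with h | h
        · exact Or.inr ⟨x, Or.inl rfl, h⟩
        · exact Or.inl h
      · exact Or.inr ⟨c, Or.inr hc, hcp⟩
    · rintro (h | ⟨c, hc | hc, hcp⟩)
      · exact Or.inl (Or.inr h)
      · exact Or.inl (Or.inl (hc ▸ hcp))
      · exact Or.inr ⟨c, hc, hcp⟩

-- ===== VERDICT (by name: the statement is the Claim_ definition above) =====
theorem possible_to_purchase_spec : Claim_equal_possible_to_purchase := by
  intro possess Costs hdom
  unfold Spec_possible_to_purchase possible_to_purchase possible_to_purchase_alt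
  have hposs : possess ≤ 2147483648 := by
    simp only [Dom_possible_to_purchase, Bool.and_eq_true, pvDomInt, decide_eq_true_eq] at hdom
    exact hdom.1.2
  cases Costs with
  | nil => simp
  | cons x xs =>
    simp only [List.length_cons]
    have h10 : ¬ ((10:Int) ^ 16 ≤ possess) := by omega
    by_cases hmin : ((x :: xs).foldl (fun m cost => min cost m) (10 ^ 16) > possess)
    · have := (foldl_min_le_iff (x :: xs) (10 ^ 16) possess).not.mp (by omega)
      push Not at this
      rcases this with ⟨_, hall⟩
      rw [if_neg (by simp), if_pos hmin]
      symm
      simp only [List.any_eq_false, decide_eq_true_eq]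
      exact fun c hc => by have := hall c hc; omega
    · have := (foldl_min_le_iff (x :: xs) (10 ^ 16) possess).mp (by omega)
      rcases this with h | ⟨c, hc, hcp⟩
      · exact absurd h h10
      · rw [if_neg (by simp), if_neg hmin]
        symm
        simp only [List.any_eq_true, decide_eq_true_eq]
        exact ⟨c, hc, hcp⟩
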